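-- pv_equiv track=rewrite | github.com/martyp11/PyB | Archive/43Block76.py | MnemonicWordIndexes
-- ===== SOURCE A (Python) =====
-- def MnemonicWordIndexes(x, Bip39List):
--     word = []
--     # change back to 0,24 with length 256
--     for _ in range(0, 12):
--         word_int = x & 2047
--         x = x >> 11
--         word.append(Bip39List[word_int])
--
--     mnemonic_string = ' '.join(word[::-1])
--     return (mnemonic_string)
-- ===== SOURCE B (Python) =====
-- def MnemonicWordIndexes(x, Bip39List):
--     masked = x & ((1 << 132) - 1)
--     bits = [(masked >> (131 - i)) & 1 for i in range(132)]
--     words = []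
--     for i in range(12):
--         chunk = bits[11 * i:11 * i + 11]
--         idx = 0
--         for b in chunk:
--             idx = idx * 2 + b
--         words.append(Bip39List[idx])
--     return ' '.join(words)
-- ===== Notes on version B (the rewrite author's own statement) =====
-- stated objective: alternative
-- what changed: B masks x to its low 132 bits once, expands them into a fixed 132-entry most-significant-first bit list, and decodes the twelve 11-bit slices front-to-back into word indexes, replacing A's iterated mask-and-shift state loop with its append-then-reverse of the word list.
import Mathlib
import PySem

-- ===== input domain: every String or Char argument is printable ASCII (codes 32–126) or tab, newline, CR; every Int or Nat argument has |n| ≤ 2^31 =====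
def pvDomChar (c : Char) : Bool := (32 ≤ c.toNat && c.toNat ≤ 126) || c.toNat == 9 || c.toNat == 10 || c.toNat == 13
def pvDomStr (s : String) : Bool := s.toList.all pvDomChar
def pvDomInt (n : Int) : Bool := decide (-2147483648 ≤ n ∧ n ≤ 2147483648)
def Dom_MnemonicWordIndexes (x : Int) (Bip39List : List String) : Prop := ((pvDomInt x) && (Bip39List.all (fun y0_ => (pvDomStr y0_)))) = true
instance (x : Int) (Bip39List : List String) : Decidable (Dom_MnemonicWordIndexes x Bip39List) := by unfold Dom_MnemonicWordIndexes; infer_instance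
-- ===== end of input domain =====

-- B re-reads the number as a fixed 132-bit big-endian bit vector and decodes 11-bit slices
-- front-to-back (no reversal), instead of A's iterated mask-and-shift with a final reverse;
-- objective: alternative (same cost), proved to return the same mnemonic string.

-- ===== PORT A =====
def MnemonicWordIndexes (x : Int) (Bip39List : List String) : String :=
  let st := (PySem.List.pyRange 0 12 1).foldl
      (fun (st : Int × List String) _ =>
        (st.1 >>> (11 : Nat),
         st.2 ++ [PySem.List.pyGetD Bip39List (PySem.Int.band st.1 2047) ""]))
      (x, ([] : List String))
  PySem.Str.join " " ((PySem.List.slice? st.2 none none (-1)).getD [])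

-- ===== PORT B =====
def MnemonicWordIndexes_alt (x : Int) (Bip39List : List String) : String :=
  let masked := PySem.Int.band x ((1:Int) <<< (132 : Nat) - 1)
  let bits := (PySem.List.pyRange 0 132 1).map
      (fun i => let sh : Nat := (131 - i).toNat
                PySem.Int.band (masked >>> sh) 1)
  let words := (PySem.List.pyRange 0 12 1).foldl
      (fun (acc : List String) i =>
        acc ++ [PySem.List.pyGetD Bip39List
          ((PySem.List.slice bits (some (11*i)) (some (11*i + 11))).foldl
            (fun a b => a*2 + b) 0) ""])
      []
  PySem.Str.join " " words

-- ===== PRECONDITION & SPEC =====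
-- Pre_ excludes exactly the inputs on which Python A raises IndexError: some of the twelve
-- extracted 11-bit indexes is not below the word-list length.
def Pre_MnemonicWordIndexes (x : Int) (Bip39List : List String) : Prop :=
  ∀ k ∈ List.range 12, PySem.Int.band (x >>> (11 * k)) 2047 < (Bip39List.length : Int)
instance (x : Int) (Bip39List : List String) : Decidable (Pre_MnemonicWordIndexes x Bip39List) := by unfold Pre_MnemonicWordIndexes; infer_instance

def pvWitness_MnemonicWordIndexes : Int × List String := (1, ["abandon", "ability"])

def Spec_MnemonicWordIndexes (x : Int) (Bip39List : List String) (out : String) : Prop := out = MnemonicWordIndexes_alt x Bip39List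
instance (x : Int) (Bip39List : List String) (out : String) : Decidable (Spec_MnemonicWordIndexes x Bip39List out) := by unfold Spec_MnemonicWordIndexes; infer_instance

-- ===== CLAIM (what is proved, stated in full; the proofs are below) =====
def Claim_equal_MnemonicWordIndexes : Prop := ∀ (x : Int) (Bip39List : List String), Dom_MnemonicWordIndexes x Bip39List → Pre_MnemonicWordIndexes x Bip39List → Spec_MnemonicWordIndexes x Bip39List (MnemonicWordIndexes x Bip39List)

-- ===== LEMMAS AND PROOFS =====

theorem band_two_pow_sub_one (a : Int) (k : Nat) :
    PySem.Int.band a (2^k - 1) = a % (2^k : Int) := by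
  have hc : ((2:Int)^k) = ((2^k : Nat) : Int) := by push_cast; ring
  have hk : (0:Nat) < 2^k := by positivity
  have h1 : ((2:Int)^k - 1).toNat = 2^k - 1 := by omega
  rcases le_or_gt 0 a with ha | ha
  · rw [PySem.Int.band_of_nonneg ha (by omega), h1, Nat.and_two_pow_sub_one_eq_mod,
      Int.natCast_mod, Int.toNat_of_nonneg ha, hc]
  · rw [PySem.Int.band]
    simp only [if_neg (by omega : ¬ (0:Int) ≤ a), if_pos (by omega : (0:Int) ≤ 2^k - 1)]
    set b : Nat := (-a - 1).toNat with hb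
    have hab : a = -(b:Int) - 1 := by omega
    rw [h1, Nat.and_comm, Nat.and_two_pow_sub_one_eq_mod]
    have hbm := Nat.div_add_mod b (2^k)
    have hbl : b % 2^k < 2^k := Nat.mod_lt _ hk
    have h2 : a = ((2^k - 1 - b % 2^k : Nat) : Int) + (2^k : Int) * (-((b / 2^k : Nat) : Int) - 1) := by
      have hcast : ((2^k : Nat) : Int) * ((b / 2^k : Nat) : Int) + ((b % 2^k : Nat) : Int) = (b : Int) := by
        exact_mod_cast congrArg (Nat.cast : Nat → Int) hbm
      have hsub : ((2^k - 1 - b % 2^k : Nat) : Int) = ((2^k : Nat) : Int) - 1 - ((b % 2^k : Nat) : Int) := by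
        omega
      rw [hab, hc, hsub]
      linear_combination hcast
    rw [h2, Int.add_mul_emod_self_left, Int.emod_eq_of_lt (by positivity) (by omega)]

theorem band2047 (a : Int) : PySem.Int.band a 2047 = a % 2048 := by
  have h := band_two_pow_sub_one a 11
  norm_num at h
  exact h

theorem band1 (a : Int) : PySem.Int.band a 1 = a % 2 := by
  rw [PySem.Int.band_one, PySem.Int.mod_eq_emod_of_pos (by norm_num)]

theorem shift_div (a : Int) (n : Nat) : a >>> n = a / (2:Int)^n := by
  rw [Int.shiftRight_eq_div_pow]
  push_cast
  ring_nf

theorem slice_map {α β : Type} (f : α → β) (xs : List α) (a b : Option Int) :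
    PySem.List.slice (xs.map f) a b = (PySem.List.slice xs a b).map f := by
  simp [PySem.List.slice, PySem.List.clampIdx, List.map_take, List.map_drop]

theorem foldBits (y : Int) (n : Nat) :
    ((List.range n).map (fun t => y / 2^(n - 1 - t) % 2)).foldl (fun a b => a*2 + b) 0
      = y % (2^n : Int) := by
  induction n generalizing y with
  | zero => simp
  | succ n ih =>
    rw [List.range_succ, List.map_append, List.foldl_append]
    simp only [List.map_cons, List.map_nil, List.foldl_cons, List.foldl_nil]
    have hlast : n + 1 - 1 - n = 0 := by omega
    rw [hlast, pow_zero, Int.ediv_one]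
    have hmap : (List.range n).map (fun t => y / 2^(n + 1 - 1 - t) % 2)
        = (List.range n).map (fun t => (y / 2) / 2^(n - 1 - t) % 2) := by
      apply List.map_congr_left
      intro t ht
      rw [List.mem_range] at ht
      have hexp : n + 1 - 1 - t = (n - 1 - t) + 1 := by omega
      rw [hexp, pow_succ', ← Int.ediv_ediv_of_nonneg (by norm_num : (0:Int) ≤ 2)]
    rw [hmap, ih]
    have e1 : y / 2 % 2^n = y / 2 - 2^n * (y / 2^(n+1)) := by
      rw [Int.emod_def, Int.ediv_ediv_of_nonneg (by norm_num : (0:Int) ≤ 2), ← pow_succ']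
    have e2 : y % 2 = y - 2 * (y / 2) := Int.emod_def _ _
    have e3 : y % 2^(n+1) = y - 2^(n+1) * (y / 2^(n+1)) := Int.emod_def _ _
    rw [e1, e2, e3, pow_succ]
    ring

theorem chunkFold (m : Int) (s : Nat) :
    ((List.range 11).map (fun t => m / 2^(s + (10 - t)) % 2)).foldl (fun a b => a*2 + b) 0
      = m / 2^s % 2048 := by
  have hmap : (List.range 11).map (fun t => m / 2^(s + (10 - t)) % 2)
      = (List.range 11).map (fun t => (m / 2^s) / 2^(11 - 1 - t) % 2) := by
    apply List.map_congr_left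
    intro t ht
    rw [List.mem_range] at ht
    rw [Int.ediv_ediv_of_nonneg (by positivity : (0:Int) ≤ 2^s), ← pow_add]
  rw [hmap, foldBits]
  norm_num

theorem chunkFoldLit (m : Int) (s : Nat) :
    (((((((((((0 : Int) * 2 + m / 2^(s + 10) % 2) * 2 + m / 2^(s + 9) % 2) * 2 + m / 2^(s + 8) % 2) * 2 + m / 2^(s + 7) % 2) * 2 + m / 2^(s + 6) % 2) * 2 + m / 2^(s + 5) % 2) * 2 + m / 2^(s + 4) % 2) * 2 + m / 2^(s + 3) % 2) * 2 + m / 2^(s + 2) % 2) * 2 + m / 2^(s + 1) % 2) * 2 + m / 2^s % 2 = m / 2^s % 2048 := by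
  have h := chunkFold m s
  simp only [List.range_succ, List.range_zero, List.map_cons, List.map_nil,
    List.foldl_cons, List.foldl_nil, List.nil_append, List.append_assoc,
    List.cons_append, Nat.reduceSub, Nat.add_zero] at h
  exact h

theorem mask_div_mod (x : Int) (s : Nat) (h : s ≤ 121) :
    (x % 2^132) / 2^s % 2048 = x / 2^s % 2048 := by
  have hne : ((2:Int)^s) ≠ 0 := by positivity
  have hx : x = x % 2^132 + 2^s * (2^(121 - s) * (2^11 * (x / 2^132))) := by
    have hp : (2:Int)^s * ((2:Int)^(121 - s) * ((2:Int)^11 * (x / 2^132)))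
        = 2^132 * (x / 2^132) := by
      rw [← mul_assoc, ← mul_assoc, ← pow_add, ← pow_add]
      congr 2
      omega
    rw [hp]
    have := Int.emod_add_mul_ediv x (2^132)
    omega
  conv_rhs => rw [hx]
  rw [Int.add_mul_ediv_left _ _ hne]
  have hq : (2:Int)^(121 - s) * ((2:Int)^11 * (x / 2^132)) = 2048 * (2^(121-s) * (x / 2^132)) := by
    ring_nf
  rw [hq, Int.add_mul_emod_self_left]

theorem A_char (x : Int) (l : List String) : MnemonicWordIndexes x l =
    PySem.Str.join " "
      [PySem.List.pyGetD l (x / 2^121 % 2048) "",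
       PySem.List.pyGetD l (x / 2^110 % 2048) "",
       PySem.List.pyGetD l (x / 2^99 % 2048) "",
       PySem.List.pyGetD l (x / 2^88 % 2048) "",
       PySem.List.pyGetD l (x / 2^77 % 2048) "",
       PySem.List.pyGetD l (x / 2^66 % 2048) "",
       PySem.List.pyGetD l (x / 2^55 % 2048) "",
       PySem.List.pyGetD l (x / 2^44 % 2048) "",
       PySem.List.pyGetD l (x / 2^33 % 2048) "",
       PySem.List.pyGetD l (x / 2^22 % 2048) "",
       PySem.List.pyGetD l (x / 2^11 % 2048) "",
       PySem.List.pyGetD l (x % 2048) ""] := by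
  unfold MnemonicWordIndexes
  rw [(by decide : PySem.List.pyRange 0 12 1 = [0,1,2,3,4,5,6,7,8,9,10,11])]
  simp only [List.foldl_cons, List.foldl_nil, List.nil_append, List.cons_append]
  rw [PySem.List.slice?_none_none_neg_one]
  simp only [Option.getD_some, List.reverse_cons, List.reverse_nil, List.nil_append,
    List.cons_append]
  simp only [← Int.shiftRight_add]
  norm_num [shift_div, band2047]

set_option maxRecDepth 16384 in
theorem B_char (x : Int) (l : List String) : MnemonicWordIndexes_alt x l =
    PySem.Str.join " "
      [PySem.List.pyGetD l (x % 2^132 / 2^121 % 2048) "",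
       PySem.List.pyGetD l (x % 2^132 / 2^110 % 2048) "",
       PySem.List.pyGetD l (x % 2^132 / 2^99 % 2048) "",
       PySem.List.pyGetD l (x % 2^132 / 2^88 % 2048) "",
       PySem.List.pyGetD l (x % 2^132 / 2^77 % 2048) "",
       PySem.List.pyGetD l (x % 2^132 / 2^66 % 2048) "",
       PySem.List.pyGetD l (x % 2^132 / 2^55 % 2048) "",
       PySem.List.pyGetD l (x % 2^132 / 2^44 % 2048) "",
       PySem.List.pyGetD l (x % 2^132 / 2^33 % 2048) "",
       PySem.List.pyGetD l (x % 2^132 / 2^22 % 2048) "",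
       PySem.List.pyGetD l (x % 2^132 / 2^11 % 2048) "",
       PySem.List.pyGetD l (x % 2^132 % 2048) ""] := by
  unfold MnemonicWordIndexes_alt
  rw [(by norm_num [Int.shiftLeft_eq] : (1:Int) <<< (132 : Nat) - 1 = 2^132 - 1),
    band_two_pow_sub_one]
  rw [(by decide : PySem.List.pyRange 0 132 1 = ([0,1,2,3,4,5,6,7,8,9,10,11,12,13,14,15,16,17,18,19,20,21,22,23,24,25,26,27,28,29,30,31,32,33,34,35,36,37,38,39,40,41,42,43,44,45,46,47,48,49,50,51,52,53,54,55,56,57,58,59,60,61,62,63,64,65,66,67,68,69,70,71,72,73,74,75,76,77,78,79,80,81,82,83,84,85,86,87,88,89,90,91,92,93,94,95,96,97,98,99,100,101,102,103,104,105,106,107,108,109,110,111,112,113,114,115,116,117,118,119,120,121,122,123,124,125,126,127,128,129,130,131] : List Int))]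
  rw [(by decide : PySem.List.pyRange 0 12 1 = [0,1,2,3,4,5,6,7,8,9,10,11])]
  simp only [List.foldl_cons, List.foldl_nil, List.nil_append, List.cons_append,
    Int.reduceMul, Int.reduceAdd, slice_map]
  rw [(by decide : PySem.List.slice ([0,1,2,3,4,5,6,7,8,9,10,11,12,13,14,15,16,17,18,19,20,21,22,23,24,25,26,27,28,29,30,31,32,33,34,35,36,37,38,39,40,41,42,43,44,45,46,47,48,49,50,51,52,53,54,55,56,57,58,59,60,61,62,63,64,65,66,67,68,69,70,71,72,73,74,75,76,77,78,79,80,81,82,83,84,85,86,87,88,89,90,91,92,93,94,95,96,97,98,99,100,101,102,103,104,105,106,107,108,109,110,111,112,113,114,115,116,117,118,119,120,121,122,123,124,125,126,127,128,129,130,131] : List Int) (some 0) (some 11) = [0,1,2,3,4,5,6,7,8,9,10])]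
  rw [(by decide : PySem.List.slice ([0,1,2,3,4,5,6,7,8,9,10,11,12,13,14,15,16,17,18,19,20,21,22,23,24,25,26,27,28,29,30,31,32,33,34,35,36,37,38,39,40,41,42,43,44,45,46,47,48,49,50,51,52,53,54,55,56,57,58,59,60,61,62,63,64,65,66,67,68,69,70,71,72,73,74,75,76,77,78,79,80,81,82,83,84,85,86,87,88,89,90,91,92,93,94,95,96,97,98,99,100,101,102,103,104,105,106,107,108,109,110,111,112,113,114,115,116,117,118,119,120,121,122,123,124,125,126,127,128,129,130,131] : List Int) (some 11) (some 22) = [11,12,13,14,15,16,17,18,19,20,21])]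
  rw [(by decide : PySem.List.slice ([0,1,2,3,4,5,6,7,8,9,10,11,12,13,14,15,16,17,18,19,20,21,22,23,24,25,26,27,28,29,30,31,32,33,34,35,36,37,38,39,40,41,42,43,44,45,46,47,48,49,50,51,52,53,54,55,56,57,58,59,60,61,62,63,64,65,66,67,68,69,70,71,72,73,74,75,76,77,78,79,80,81,82,83,84,85,86,87,88,89,90,91,92,93,94,95,96,97,98,99,100,101,102,103,104,105,106,107,108,109,110,111,112,113,114,115,116,117,118,119,120,121,122,123,124,125,126,127,128,129,130,131] : List Int) (some 22) (some 33) = [22,23,24,25,26,27,28,29,30,31,32])]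
  rw [(by decide : PySem.List.slice ([0,1,2,3,4,5,6,7,8,9,10,11,12,13,14,15,16,17,18,19,20,21,22,23,24,25,26,27,28,29,30,31,32,33,34,35,36,37,38,39,40,41,42,43,44,45,46,47,48,49,50,51,52,53,54,55,56,57,58,59,60,61,62,63,64,65,66,67,68,69,70,71,72,73,74,75,76,77,78,79,80,81,82,83,84,85,86,87,88,89,90,91,92,93,94,95,96,97,98,99,100,101,102,103,104,105,106,107,108,109,110,111,112,113,114,115,116,117,118,119,120,121,122,123,124,125,126,127,128,129,130,131] : List Int) (some 33) (some 44) = [33,34,35,36,37,38,39,40,41,42,43])]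
  rw [(by decide : PySem.List.slice ([0,1,2,3,4,5,6,7,8,9,10,11,12,13,14,15,16,17,18,19,20,21,22,23,24,25,26,27,28,29,30,31,32,33,34,35,36,37,38,39,40,41,42,43,44,45,46,47,48,49,50,51,52,53,54,55,56,57,58,59,60,61,62,63,64,65,66,67,68,69,70,71,72,73,74,75,76,77,78,79,80,81,82,83,84,85,86,87,88,89,90,91,92,93,94,95,96,97,98,99,100,101,102,103,104,105,106,107,108,109,110,111,112,113,114,115,116,117,118,119,120,121,122,123,124,125,126,127,128,129,130,131] : List Int) (some 44) (some 55) = [44,45,46,47,48,49,50,51,52,53,54])]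
  rw [(by decide : PySem.List.slice ([0,1,2,3,4,5,6,7,8,9,10,11,12,13,14,15,16,17,18,19,20,21,22,23,24,25,26,27,28,29,30,31,32,33,34,35,36,37,38,39,40,41,42,43,44,45,46,47,48,49,50,51,52,53,54,55,56,57,58,59,60,61,62,63,64,65,66,67,68,69,70,71,72,73,74,75,76,77,78,79,80,81,82,83,84,85,86,87,88,89,90,91,92,93,94,95,96,97,98,99,100,101,102,103,104,105,106,107,108,109,110,111,112,113,114,115,116,117,118,119,120,121,122,123,124,125,126,127,128,129,130,131] : List Int) (some 55) (some 66) = [55,56,57,58,59,60,61,62,63,64,65])]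
  rw [(by decide : PySem.List.slice ([0,1,2,3,4,5,6,7,8,9,10,11,12,13,14,15,16,17,18,19,20,21,22,23,24,25,26,27,28,29,30,31,32,33,34,35,36,37,38,39,40,41,42,43,44,45,46,47,48,49,50,51,52,53,54,55,56,57,58,59,60,61,62,63,64,65,66,67,68,69,70,71,72,73,74,75,76,77,78,79,80,81,82,83,84,85,86,87,88,89,90,91,92,93,94,95,96,97,98,99,100,101,102,103,104,105,106,107,108,109,110,111,112,113,114,115,116,117,118,119,120,121,122,123,124,125,126,127,128,129,130,131] : List Int) (some 66) (some 77) = [66,67,68,69,70,71,72,73,74,75,76])]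
  rw [(by decide : PySem.List.slice ([0,1,2,3,4,5,6,7,8,9,10,11,12,13,14,15,16,17,18,19,20,21,22,23,24,25,26,27,28,29,30,31,32,33,34,35,36,37,38,39,40,41,42,43,44,45,46,47,48,49,50,51,52,53,54,55,56,57,58,59,60,61,62,63,64,65,66,67,68,69,70,71,72,73,74,75,76,77,78,79,80,81,82,83,84,85,86,87,88,89,90,91,92,93,94,95,96,97,98,99,100,101,102,103,104,105,106,107,108,109,110,111,112,113,114,115,116,117,118,119,120,121,122,123,124,125,126,127,128,129,130,131] : List Int) (some 77) (some 88) = [77,78,79,80,81,82,83,84,85,86,87])]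
  rw [(by decide : PySem.List.slice ([0,1,2,3,4,5,6,7,8,9,10,11,12,13,14,15,16,17,18,19,20,21,22,23,24,25,26,27,28,29,30,31,32,33,34,35,36,37,38,39,40,41,42,43,44,45,46,47,48,49,50,51,52,53,54,55,56,57,58,59,60,61,62,63,64,65,66,67,68,69,70,71,72,73,74,75,76,77,78,79,80,81,82,83,84,85,86,87,88,89,90,91,92,93,94,95,96,97,98,99,100,101,102,103,104,105,106,107,108,109,110,111,112,113,114,115,116,117,118,119,120,121,122,123,124,125,126,127,128,129,130,131] : List Int) (some 88) (some 99) = [88,89,90,91,92,93,94,95,96,97,98])]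
  rw [(by decide : PySem.List.slice ([0,1,2,3,4,5,6,7,8,9,10,11,12,13,14,15,16,17,18,19,20,21,22,23,24,25,26,27,28,29,30,31,32,33,34,35,36,37,38,39,40,41,42,43,44,45,46,47,48,49,50,51,52,53,54,55,56,57,58,59,60,61,62,63,64,65,66,67,68,69,70,71,72,73,74,75,76,77,78,79,80,81,82,83,84,85,86,87,88,89,90,91,92,93,94,95,96,97,98,99,100,101,102,103,104,105,106,107,108,109,110,111,112,113,114,115,116,117,118,119,120,121,122,123,124,125,126,127,128,129,130,131] : List Int) (some 99) (some 110) = [99,100,101,102,103,104,105,106,107,108,109])]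
  rw [(by decide : PySem.List.slice ([0,1,2,3,4,5,6,7,8,9,10,11,12,13,14,15,16,17,18,19,20,21,22,23,24,25,26,27,28,29,30,31,32,33,34,35,36,37,38,39,40,41,42,43,44,45,46,47,48,49,50,51,52,53,54,55,56,57,58,59,60,61,62,63,64,65,66,67,68,69,70,71,72,73,74,75,76,77,78,79,80,81,82,83,84,85,86,87,88,89,90,91,92,93,94,95,96,97,98,99,100,101,102,103,104,105,106,107,108,109,110,111,112,113,114,115,116,117,118,119,120,121,122,123,124,125,126,127,128,129,130,131] : List Int) (some 110) (some 121) = [110,111,112,113,114,115,116,117,118,119,120])]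
  rw [(by decide : PySem.List.slice ([0,1,2,3,4,5,6,7,8,9,10,11,12,13,14,15,16,17,18,19,20,21,22,23,24,25,26,27,28,29,30,31,32,33,34,35,36,37,38,39,40,41,42,43,44,45,46,47,48,49,50,51,52,53,54,55,56,57,58,59,60,61,62,63,64,65,66,67,68,69,70,71,72,73,74,75,76,77,78,79,80,81,82,83,84,85,86,87,88,89,90,91,92,93,94,95,96,97,98,99,100,101,102,103,104,105,106,107,108,109,110,111,112,113,114,115,116,117,118,119,120,121,122,123,124,125,126,127,128,129,130,131] : List Int) (some 121) (some 132) = [121,122,123,124,125,126,127,128,129,130,131])]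
  simp only [List.map_cons, List.map_nil, List.foldl_cons, List.foldl_nil]
  have h121 := chunkFoldLit (x % 2^132) 121
  have h110 := chunkFoldLit (x % 2^132) 110
  have h99 := chunkFoldLit (x % 2^132) 99
  have h88 := chunkFoldLit (x % 2^132) 88
  have h77 := chunkFoldLit (x % 2^132) 77
  have h66 := chunkFoldLit (x % 2^132) 66
  have h55 := chunkFoldLit (x % 2^132) 55
  have h44 := chunkFoldLit (x % 2^132) 44
  have h33 := chunkFoldLit (x % 2^132) 33
  have h22 := chunkFoldLit (x % 2^132) 22
  have h11 := chunkFoldLit (x % 2^132) 11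
  have h0 := chunkFoldLit (x % 2^132) 0
  norm_num at h121 h110 h99 h88 h77 h66 h55 h44 h33 h22 h11 h0
  simp only [Int.reduceSub, Int.reduceToNat]
  norm_num [shift_div, band1]
  rw [h121, h110, h99, h88, h77, h66, h55, h44, h33, h22, h11, h0]

theorem AB_eq (x : Int) (l : List String) : MnemonicWordIndexes x l = MnemonicWordIndexes_alt x l := by
  rw [A_char, B_char]
  rw [mask_div_mod x 121 (by norm_num), mask_div_mod x 110 (by norm_num), mask_div_mod x 99 (by norm_num), mask_div_mod x 88 (by norm_num), mask_div_mod x 77 (by norm_num), mask_div_mod x 66 (by norm_num), mask_div_mod x 55 (by norm_num), mask_div_mod x 44 (by norm_num), mask_div_mod x 33 (by norm_num), mask_div_mod x 22 (by norm_num), mask_div_mod x 11 (by norm_num)]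
  rw [Int.emod_emod_of_dvd x (by norm_num : (2048:Int) ∣ 2^132)]

-- ===== VERDICT (by name: the statement is the Claim_ definition above) =====
theorem MnemonicWordIndexes_spec : Claim_equal_MnemonicWordIndexes := by
  intro x l _ _
  unfold Spec_MnemonicWordIndexes
  exact AB_eq x l
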